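-- pv_equiv track=rewrite | github.com/kimchange/SeReNet | twnet/code/utils.py | ravel_multi_index
-- ===== SOURCE A (Python) =====
-- def ravel_multi_index(multi_index, shape):
--     out = 0
--     multi_index = list(multi_index)
--     for dim in shape[1:]:
--         out += multi_index[0]
--         out *= dim
--         multi_index.pop(0)
--     out += multi_index[0]
--     return out
-- ===== SOURCE B (Python) =====
-- def ravel_multi_index(multi_index, shape):
--     out = 0
--     stride = 1
--     for m, dim in zip(reversed(multi_index[:len(shape)]), reversed(shape)):
--         out += m * stride
--         stride *= dim
--     return out
-- ===== Notes on version B (the rewrite author's own statement) =====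
-- stated objective: idiomatic
-- what changed: Replaces A's front-to-back Horner loop (which destructively pops from a copy of multi_index and reads shape[1:]) with the standard strides view: a single back-to-front pass over zip(reversed(multi_index[:len(shape)]), reversed(shape)) accumulating out and a stride product.
-- intended difference: On an empty shape with a nonzero first index A returns multi_index[0] because its trailing add always executes; B returns 0, the only valid linear index into a zero-dimensional array. — e.g. on ravel_multi_index([5], []): A returns 5, B returns 0
import Mathlib
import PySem

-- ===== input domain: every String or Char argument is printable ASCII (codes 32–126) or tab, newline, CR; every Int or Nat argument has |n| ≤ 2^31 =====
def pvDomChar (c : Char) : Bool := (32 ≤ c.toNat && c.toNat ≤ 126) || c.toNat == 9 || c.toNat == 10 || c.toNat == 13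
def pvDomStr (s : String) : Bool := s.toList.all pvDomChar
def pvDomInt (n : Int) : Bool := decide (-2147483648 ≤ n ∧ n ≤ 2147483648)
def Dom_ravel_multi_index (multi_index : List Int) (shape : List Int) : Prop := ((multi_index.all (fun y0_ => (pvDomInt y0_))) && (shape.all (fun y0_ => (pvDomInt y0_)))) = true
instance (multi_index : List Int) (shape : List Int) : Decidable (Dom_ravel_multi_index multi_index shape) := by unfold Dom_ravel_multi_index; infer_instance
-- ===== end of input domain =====

-- ===== PORT A =====
-- B changes the decomposition to the standard back-to-front strides view; same O(n) cost (objective: idiomatic).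
-- multi_index[0] / .pop(0) are ported as headD 0 / tail: exact whenever the list is nonempty, which Pre_ guarantees at every access.
def ravel_multi_index (multi_index : List Int) (shape : List Int) : Int :=
  let r := (PySem.List.slice shape (some 1) none).foldl
    (fun (st : Int × List Int) dim => ((st.1 + st.2.headD 0) * dim, st.2.tail)) (0, multi_index)
  r.1 + r.2.headD 0

-- ===== PORT B =====
def ravel_multi_index_alt (multi_index : List Int) (shape : List Int) : Int :=
  let pairs := List.zip ((PySem.List.slice multi_index none (some (shape.length : Int))).reverse) shape.reverse
  (pairs.foldl (fun (st : Int × Int) md => (st.1 + md.1 * st.2, st.2 * md.2)) (0, 1)).1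

-- ===== PRECONDITION & SPEC =====
-- Pre_ excludes exactly the inputs on which A raises IndexError: A reads multi_index[0] once plus once per element of shape[1:].
def Pre_ravel_multi_index (multi_index : List Int) (shape : List Int) : Prop :=
  max shape.length 1 ≤ multi_index.length
instance (multi_index : List Int) (shape : List Int) : Decidable (Pre_ravel_multi_index multi_index shape) := by unfold Pre_ravel_multi_index; infer_instance
def pvWitness_ravel_multi_index : List Int × List Int := ([1, 2], [3, 4])

-- On an empty shape with a nonzero first index A returns multi_index[0] because its trailing add always executes; B returns 0, the only valid linear index into a zero-dimensional array.
def D_ravel_multi_index (multi_index : List Int) (shape : List Int) : Prop :=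
  shape = [] ∧ multi_index.headD 0 ≠ 0
instance (multi_index : List Int) (shape : List Int) : Decidable (D_ravel_multi_index multi_index shape) := by unfold D_ravel_multi_index; infer_instance
def Spec_ravel_multi_index (multi_index : List Int) (shape : List Int) (out : Int) : Prop := ¬ D_ravel_multi_index multi_index shape → out = ravel_multi_index_alt multi_index shape
instance (multi_index : List Int) (shape : List Int) (out : Int) : Decidable (Spec_ravel_multi_index multi_index shape out) := by unfold Spec_ravel_multi_index; infer_instance
def pvDiffWitness_ravel_multi_index : List Int × List Int := ([5], [])
def pvDiffWitnessOut_ravel_multi_index : Int × Int := (5, 0)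

-- ===== CLAIM (what is proved, stated in full; the proofs are below) =====
def Claim_unchanged_ravel_multi_index : Prop := ∀ (multi_index : List Int) (shape : List Int), Dom_ravel_multi_index multi_index shape → Pre_ravel_multi_index multi_index shape → Spec_ravel_multi_index multi_index shape (ravel_multi_index multi_index shape)
def Claim_changed_ravel_multi_index : Prop := Dom_ravel_multi_index (pvDiffWitness_ravel_multi_index.1) (pvDiffWitness_ravel_multi_index.2) ∧ Pre_ravel_multi_index (pvDiffWitness_ravel_multi_index.1) (pvDiffWitness_ravel_multi_index.2) ∧ D_ravel_multi_index (pvDiffWitness_ravel_multi_index.1) (pvDiffWitness_ravel_multi_index.2) ∧ ravel_multi_index (pvDiffWitness_ravel_multi_index.1) (pvDiffWitness_ravel_multi_index.2) = pvDiffWitnessOut_ravel_multi_index.1 ∧ ravel_multi_index_alt (pvDiffWitness_ravel_multi_index.1) (pvDiffWitness_ravel_multi_index.2) = pvDiffWitnessOut_ravel_multi_index.2 ∧ pvDiffWitnessOut_ravel_multi_index.1 ≠ pvDiffWitnessOut_ravel_multi_index.2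
def Claim_exact_ravel_multi_index : Prop := ∀ (multi_index : List Int) (shape : List Int), Dom_ravel_multi_index multi_index shape → Pre_ravel_multi_index multi_index shape → D_ravel_multi_index multi_index shape → ravel_multi_index multi_index shape ≠ ravel_multi_index_alt multi_index shape

-- ===== LEMMAS AND PROOFS =====
-- V mi sh = the intended linear index: sum of mi[i] times the product of sh[i+1:], recursing on sh.
def V : List Int → List Int → Int
  | _, [] => 0
  | mi, _ :: rs => mi.headD 0 * rs.prod + V mi.tail rs

-- G p = m0 + d0*(m1 + d1*(...)) for p = [(m0,d0),(m1,d1),...]: what B's fold accumulates, read back-to-front.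
def G : List (Int × Int) → Int
  | [] => 0
  | (m, d) :: ps => m + d * G ps

theorem foldA_spec (rest : List Int) : ∀ (out : Int) (mi : List Int),
    (rest.foldl (fun (st : Int × List Int) dim => ((st.1 + st.2.headD 0) * dim, st.2.tail)) (out, mi)).1
      + (rest.foldl (fun (st : Int × List Int) dim => ((st.1 + st.2.headD 0) * dim, st.2.tail)) (out, mi)).2.headD 0
    = (out + mi.headD 0) * rest.prod + V mi.tail rest := by
  induction rest with
  | nil => intro out mi; simp [V]
  | cons d rs ih =>
    intro out mi
    simp only [List.foldl_cons, List.prod_cons, V]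
    rw [ih]
    ring

theorem ravel_eq_V (multi_index : List Int) (d : Int) (rs : List Int) :
    ravel_multi_index multi_index (d :: rs) = V multi_index (d :: rs) := by
  unfold ravel_multi_index
  rw [PySem.List.slice_from_one]
  simpa [V] using foldA_spec rs 0 multi_index

theorem foldB_spec (p : List (Int × Int)) : ∀ (out stride : Int),
    (p.foldl (fun (st : Int × Int) md => (st.1 + md.1 * st.2, st.2 * md.2)) (out, stride)).1
    = out + stride * G p := by
  induction p with
  | nil => intro out stride; simp [G]
  | cons md ps ih =>
    intro out stride
    obtain ⟨m, d⟩ := md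
    simp only [List.foldl_cons, G]
    rw [ih]
    ring

theorem G_append (xs ys : List (Int × Int)) :
    G (xs ++ ys) = G xs + (xs.map Prod.snd).prod * G ys := by
  induction xs with
  | nil => simp [G]
  | cons md xs ih =>
    obtain ⟨m, d⟩ := md
    simp only [List.cons_append, G, ih, List.map_cons, List.prod_cons]
    ring

theorem G_zip_reverse (sh : List Int) : ∀ (mi : List Int), sh.length ≤ mi.length →
    G (List.zip (mi.take sh.length) sh).reverse = V mi sh := by
  induction sh with
  | nil => intro mi _; simp [G, V]
  | cons d rs ih =>
    intro mi h
    cases mi with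
    | nil => simp at h
    | cons m mt =>
      simp only [List.length_cons, List.take_succ_cons, List.zip_cons_cons, List.reverse_cons]
      rw [G_append, ih mt (by simpa using h)]
      have h' : rs.length ≤ mt.length := by simpa using h
      have hlen : rs.length ≤ (mt.take rs.length).length := by
        simp [List.length_take]; omega
      rw [List.map_reverse, List.map_snd_zip hlen, List.prod_reverse]
      simp [V, G]
      ring

theorem alt_eq_V (multi_index : List Int) (shape : List Int)
    (h : shape.length ≤ multi_index.length) :
    ravel_multi_index_alt multi_index shape = V multi_index shape := by
  unfold ravel_multi_index_alt
  rw [PySem.List.slice_to_natCast]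
  have hz : List.zip (multi_index.take shape.length).reverse shape.reverse
      = (List.zip (multi_index.take shape.length) shape).reverse := by
    rw [List.zip_eq_zipWith, List.zip_eq_zipWith, List.reverse_zipWith]
    simp; omega
  rw [hz, foldB_spec]
  rw [G_zip_reverse shape multi_index h]
  ring

-- ===== VERDICT (by name: the statement is the Claim_ definition above) =====
theorem ravel_multi_index_spec : Claim_unchanged_ravel_multi_index := by
  intro multi_index shape _ hpre hnd
  cases shape with
  | nil =>
    have h0 : multi_index.headD 0 = 0 := by
      by_contra hne
      exact hnd ⟨rfl, hne⟩
    have hA : ravel_multi_index multi_index [] = multi_index.headD 0 := by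
      unfold ravel_multi_index
      rw [PySem.List.slice_from_one]
      simp
    rw [hA, h0, alt_eq_V multi_index [] (by simp), V]
  | cons d rs =>
    have hlen : (d :: rs).length ≤ multi_index.length := by
      unfold Pre_ravel_multi_index at hpre; omega
    rw [ravel_eq_V, alt_eq_V multi_index (d :: rs) hlen]

theorem ravel_multi_index_changed : Claim_changed_ravel_multi_index := by
  unfold Claim_changed_ravel_multi_index; decide

theorem ravel_multi_index_tight : Claim_exact_ravel_multi_index := by
  intro multi_index shape _ hpre hd
  obtain ⟨hsh, hne⟩ := hd
  subst hsh
  have hA : ravel_multi_index multi_index [] = multi_index.headD 0 := by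
    unfold ravel_multi_index
    rw [PySem.List.slice_from_one]
    simp
  have hB : ravel_multi_index_alt multi_index [] = 0 := by
    rw [alt_eq_V multi_index [] (by simp), V]
  rw [hA, hB]
  exact hne
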